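-- pv_equiv track=rewrite | github.com/LU-Sharvan/FoP | Copy.py | fill_unique
-- ===== SOURCE A (Python) =====
-- def fill_unique(list, new_list=None):
--     # Initializing list
--     if new_list is None:
--         new_list = []
--
--     # Base case
--     if len(list) == 0:
--         return new_list
--
--     # Checks if the current iteration of the list starts with 0
--     if list[0] == 0:
--         replacer = 1
--
--         # For every time the replacer is in the list or new list, the value increases by 1
--         while replacer in list[1:] or replacer in new_list:
--             replacer += 1
--         return fill_unique(list[1:], new_list + [replacer])  # Next iteration with replacement added to the new list
--
--     # If the list doesn't start with 0, the next iteration will have the non-zero value in the new list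
--     else:
--         return fill_unique(list[1:], new_list + [list[0]])
-- ===== SOURCE B (Python) =====
-- def fill_unique(list, new_list=None):
--     prefix = [] if new_list is None else new_list
--     # every value that may never be used as a replacement: the given prefix,
--     # the non-zero values of the input, and (added as we go) earlier replacements
--     seen = set(prefix)
--     seen.update(x for x in list if x != 0)
--     out = []
--     cand = 1  # monotone pointer: replacements are strictly increasing
--     for x in list:
--         if x == 0:
--             while cand in seen:
--                 cand += 1
--             out.append(cand)
--             seen.add(cand)
--             cand += 1
--         else:
--             out.append(x)
--     return prefix + out
-- ===== Notes on version B (the rewrite author's own statement) =====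
-- stated objective: faster
-- what changed: One iterative pass with a precomputed set of forbidden values and a monotone upward candidate pointer replaces A's recursion that re-slices the list and restarts a linear membership search from 1 at every zero.
import Mathlib
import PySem

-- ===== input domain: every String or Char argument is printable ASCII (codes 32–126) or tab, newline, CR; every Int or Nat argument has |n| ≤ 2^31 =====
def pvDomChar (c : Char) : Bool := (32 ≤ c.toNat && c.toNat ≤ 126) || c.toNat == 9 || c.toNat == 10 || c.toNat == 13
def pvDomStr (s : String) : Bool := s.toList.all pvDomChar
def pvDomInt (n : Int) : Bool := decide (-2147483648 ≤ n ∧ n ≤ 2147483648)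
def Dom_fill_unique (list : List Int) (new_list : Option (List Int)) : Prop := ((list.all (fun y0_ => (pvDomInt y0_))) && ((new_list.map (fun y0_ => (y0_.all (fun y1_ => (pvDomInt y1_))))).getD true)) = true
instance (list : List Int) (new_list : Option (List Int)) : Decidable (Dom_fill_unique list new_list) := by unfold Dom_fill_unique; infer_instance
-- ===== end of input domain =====

-- B replaces A's recursion (which re-slices the list and restarts a linear search from 1
-- at every zero) by one pass with a precomputed forbidden set and a monotone candidate pointer.


-- ===== PORT A =====
-- shared totality device for the Python 'while cand in …: cand += 1' loops of BOTH versions: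
-- advance r while mem r holds; fuel only makes the recursion structural (always called with enough)
def pvSeek (mem : Int → Bool) (r : Int) : Nat → Int
  | 0 => r
  | n + 1 => if mem r then pvSeek mem (r + 1) n else r

-- A's recursion: list[1:] is the pattern-matched tail t; 'replacer in list[1:] or replacer in new_list'
def pvFillA : List Int → List Int → List Int
  | [], nl => nl
  | x :: t, nl =>
    if x = 0 then
      pvFillA t (nl ++ [pvSeek (fun r => t.contains r || nl.contains r) 1 (t.length + nl.length + 1)])
    else
      pvFillA t (nl ++ [x])

def fill_unique (list : List Int) (new_list : Option (List Int)) : List Int :=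
  pvFillA list (new_list.getD [])

-- ===== PORT B =====
-- B's single pass: out, seen, cand are the Python loop's state
def pvFillB (fuel : Nat) : List Int → List Int → PySem.Set Int → Int → List Int
  | [], out, _, _ => out
  | x :: t, out, seen, cand =>
    if x = 0 then
      let c := pvSeek (fun r => PySem.Set.contains seen r) cand fuel
      pvFillB fuel t (out ++ [c]) (PySem.Set.add seen c) (c + 1)
    else
      pvFillB fuel t (out ++ [x]) seen cand

def fill_unique_alt (list : List Int) (new_list : Option (List Int)) : List Int :=
  let pref := new_list.getD []
  let seen := (list.filter (fun x => x != 0)).foldl PySem.Set.add (PySem.Set.ofList pref)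
  pref ++ pvFillB (pref.length + list.length + 1) list [] seen 1

-- ===== PRECONDITION & SPEC =====
def Spec_fill_unique (list : List Int) (new_list : Option (List Int)) (out : List Int) : Prop := out = fill_unique_alt list new_list
instance (list : List Int) (new_list : Option (List Int)) (out : List Int) : Decidable (Spec_fill_unique list new_list out) := by unfold Spec_fill_unique; infer_instance

-- ===== CLAIM (what is proved, stated in full; the proofs are below) =====
def Claim_equal_fill_unique : Prop := ∀ (list : List Int) (new_list : Option (List Int)), Dom_fill_unique list new_list → Spec_fill_unique list new_list (fill_unique list new_list)

-- ===== LEMMAS AND PROOFS =====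

theorem pvSeek_min (mem : Int → Bool) : ∀ (fuel : Nat) (start v : Int), start ≤ v → v < start + fuel →
    mem v = false → (∀ u, start ≤ u → u < v → mem u = true) → pvSeek mem start fuel = v := by
  intro fuel
  induction fuel with
  | zero => intro start v h1 h2 _ _; simp at h2; omega
  | succ n ih =>
    intro start v h1 h2 hv hmin
    by_cases hs : mem start = true
    · have hne : start ≠ v := by intro e; rw [e, hv] at hs; cases hs
      rw [pvSeek, hs]
      simp only [if_true]
      exact ih (start + 1) v (by omega) (by push_cast at h2 ⊢; omega) hv
        (fun u hu1 hu2 => hmin u (by omega) hu2)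
    · have : v = start := by
        by_contra hne
        have := hmin start le_rfl (by omega)
        exact hs this
      rw [pvSeek, eq_false_of_ne_true hs]
      simp [this]

theorem pvLeastFree (mem : Int → Bool) : ∀ (n : Nat) (start : Int), (∃ k : Nat, k ≤ n ∧ mem (start + (k : Int)) = false) →
    ∃ v, start ≤ v ∧ v ≤ start + (n : Int) ∧ mem v = false ∧ ∀ u, start ≤ u → u < v → mem u = true := by
  intro n
  induction n with
  | zero =>
    intro start ⟨k, hk, hf⟩
    have : k = 0 := by omega
    subst this
    exact ⟨start, le_rfl, by simp, by simpa using hf, fun u h1 h2 => absurd h1 (by omega)⟩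
  | succ n ih =>
    intro start ⟨k, hk, hf⟩
    by_cases hs : mem start = true
    · have hk0 : k ≠ 0 := by intro e; subst e; simp at hf; rw [hf] at hs; cases hs
      obtain ⟨v, hv1, hv2, hv3, hv4⟩ := ih (start + 1) ⟨k - 1, by omega, by
        have : start + 1 + ((k - 1 : Nat) : Int) = start + (k : Int) := by push_cast; omega
        rw [this]; exact hf⟩
      refine ⟨v, by omega, by push_cast at hv2 ⊢; omega, hv3, fun u h1 h2 => ?_⟩
      rcases eq_or_lt_of_le h1 with e | l
      · rw [← e]; exact hs
      · exact hv4 u (by omega) h2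
    · exact ⟨start, le_rfl, by push_cast; omega, eq_false_of_ne_true hs,
        fun u h1 h2 => absurd h1 (by omega)⟩

theorem pvIntervalLen (s : List Int) (a v : Int) (h : ∀ u, a ≤ u → u < v → u ∈ s) : v - a ≤ (s.length : Int) := by
  by_cases hav : v ≤ a
  · omega
  · have hsub : ∀ x ∈ PySem.List.pyRange a v 1, x ∈ s := by
      intro x hx
      rw [PySem.List.mem_pyRange_one] at hx
      exact h x hx.1 hx.2
    have hnd := PySem.List.nodup_pyRange_one (a := a) (b := v)
    have hlen : (PySem.List.pyRange a v 1).length ≤ s.length := by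
      have h1 : (PySem.List.pyRange a v 1).toFinset.card = (PySem.List.pyRange a v 1).length :=
        List.toFinset_card_of_nodup hnd
      have h2 : (PySem.List.pyRange a v 1).toFinset ⊆ s.toFinset := by
        intro x hx
        rw [List.mem_toFinset] at hx ⊢
        exact hsub x hx
      have := Finset.card_le_card h2
      have h3 := s.toFinset_card_le
      omega
    rw [PySem.List.length_pyRange_one] at hlen
    omega

theorem pvPigeon (s : List Int) (start : Int) : ∃ k : Nat, k ≤ s.length ∧ s.contains (start + (k : Int)) = false := by
  by_contra hc
  push_neg at hc
  have hall : ∀ u, start ≤ u → u < start + (s.length : Int) + 1 → u ∈ s := by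
    intro u h1 h2
    have hk : ∃ k : Nat, (k : Int) = u - start ∧ k ≤ s.length := ⟨(u - start).toNat, by omega, by omega⟩
    obtain ⟨k, hke, hkle⟩ := hk
    have h' := eq_true_of_ne_false (hc k hkle)
    rw [List.contains_iff_mem] at h'
    rwa [show start + (k : Int) = u by omega] at h'
  have := pvIntervalLen s start (start + (s.length : Int) + 1) hall
  omega

theorem pvFoldlAddLen (l : List Int) : ∀ s : PySem.Set Int, (l.foldl PySem.Set.add s).length ≤ s.length + l.length := by
  induction l with
  | nil => intro s; simp
  | cons x t ih =>
    intro s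
    simp only [List.foldl_cons, List.length_cons]
    have h1 : (PySem.Set.add s x).length ≤ s.length + 1 := by
      rw [PySem.Set.add]
      split
      · omega
      · simp
    have := ih (PySem.Set.add s x)
    omega

theorem pvFilterCount (l : List Int) : (l.filter (fun x => x != 0)).length + l.count 0 = l.length := by
  induction l with
  | nil => simp
  | cons x t ih =>
    by_cases hx : x = 0
    · subst hx; simp [List.count_cons, ih]; omega
    · simp [List.filter_cons, List.count_cons, hx, bne_iff_ne]
      omega

theorem pvAddLen (s : PySem.Set Int) (x : Int) : (PySem.Set.add s x).length ≤ s.length + 1 := by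
  rw [PySem.Set.add]
  split
  · omega
  · simp

theorem pvMain : ∀ (t pre out : List Int) (seen : PySem.Set Int) (cand : Int) (fuel : Nat),
    1 ≤ cand →
    (∀ k : Int, 1 ≤ k → k < cand → k ∈ seen) →
    (∀ r : Int, 1 ≤ r → (r ∈ seen ↔ r ∈ t ∨ r ∈ pre ++ out)) →
    (seen.length : Int) + t.count 0 < (fuel : Int) →
    pvFillA t (pre ++ out) = pre ++ pvFillB fuel t out seen cand := by
  intro t
  induction t with
  | nil => intro pre out seen cand fuel _ _ _ _; rfl
  | cons x t ih =>
    intro pre out seen cand fuel hc h2 h1 hf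
    by_cases hx : x = 0
    · subst hx
      obtain ⟨k, hk1, hk2⟩ := pvPigeon seen cand
      obtain ⟨v, hv1, hv2, hv3, hv4⟩ :=
        pvLeastFree (fun r => PySem.Set.contains seen r) seen.length cand
          ⟨k, hk1, by simpa using hk2⟩
      have hvnot : v ∉ seen := by
        intro hm
        rw [← PySem.Set.contains_iff] at hm
        rw [hm] at hv3
        cases hv3
      have hseenmem : ∀ u, 1 ≤ u → u < v → u ∈ seen := by
        intro u hu1 hu2
        by_cases hcu : u < cand
        · exact h2 u hu1 hcu
        · have := hv4 u (by omega) hu2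
          simp only [PySem.Set.contains_eq_listContains, List.contains_iff_mem] at this
          exact this
      have hvpos : 1 ≤ v := le_trans hc hv1
      have hbound := pvIntervalLen seen 1 v hseenmem
      have hB : pvSeek (fun r => PySem.Set.contains seen r) cand fuel = v :=
        pvSeek_min _ fuel cand v hv1 (by omega) hv3 hv4
      have hvA : v ∉ (0 :: t) ∧ v ∉ pre ++ out := by
        have h0 := h1 v hvpos
        constructor <;> (intro hm; exact hvnot (h0.mpr (by tauto)))
      have hsubA : ∀ u, 1 ≤ u → u < v → u ∈ t ++ (pre ++ out) := by
        intro u hu1 hu2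
        have h0 := (h1 u hu1).mp (hseenmem u hu1 hu2)
        rw [List.mem_append]
        rcases h0 with h | h
        · left
          rcases List.mem_cons.mp h with e | h'
          · omega
          · exact h'
        · right; exact h
      have hboundA := pvIntervalLen (t ++ (pre ++ out)) 1 v hsubA
      rw [List.length_append] at hboundA
      have hA : pvSeek (fun r => t.contains r || (pre ++ out).contains r) 1
          (t.length + (pre ++ out).length + 1) = v := by
        apply pvSeek_min _ _ 1 v hvpos (by push_cast; omega)
        · simp only [Bool.or_eq_false_iff]
          constructor
          · rw [← Bool.not_eq_true, List.contains_iff_mem]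
            exact fun hm => hvA.1 (List.mem_cons_of_mem _ hm)
          · rw [← Bool.not_eq_true, List.contains_iff_mem]
            exact hvA.2
        · intro u hu1 hu2
          have := hsubA u hu1 hu2
          rw [List.mem_append] at this
          simp only [Bool.or_eq_true, List.contains_iff_mem]
          exact this
      show pvFillA (0 :: t) (pre ++ out) = pre ++ pvFillB fuel (0 :: t) out seen cand
      rw [pvFillA, pvFillB]
      simp only [if_pos rfl]
      rw [hA, hB, List.append_assoc]
      apply ih pre (out ++ [v]) (PySem.Set.add seen v) (v + 1) fuel (by omega)
      · intro j hj1 hj2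
        rw [PySem.Set.mem_add]
        rcases lt_or_eq_of_le (show j ≤ v by omega) with h | h
        · exact Or.inl (hseenmem j hj1 h)
        · exact Or.inr h
      · intro r hr
        have hr0 : r ≠ (0 : Int) := by omega
        have h0 := h1 r hr
        rw [PySem.Set.mem_add]
        simp only [List.mem_append, List.mem_cons, List.mem_singleton] at h0 ⊢
        rw [h0]
        tauto
      · have := pvAddLen seen v
        have hcnt : (0 :: t).count 0 = t.count 0 + 1 := by simp
        rw [hcnt] at hf
        push_cast at hf ⊢
        omega
    · rw [show pvFillA (x :: t) (pre ++ out)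
          = pvFillA t ((pre ++ out) ++ [x]) from by rw [pvFillA, if_neg hx],
        show pvFillB fuel (x :: t) out seen cand
          = pvFillB fuel t (out ++ [x]) seen cand from by rw [pvFillB, if_neg hx],
        List.append_assoc]
      apply ih pre (out ++ [x]) seen cand fuel hc h2
      · intro r hr
        have h0 := h1 r hr
        simp only [List.mem_append, List.mem_cons, List.mem_singleton] at h0 ⊢
        rw [h0]
        tauto
      · have hcnt : (x :: t).count 0 = t.count 0 := by simp [List.count_cons, hx]
        rw [hcnt] at hf
        exact hf

-- ===== VERDICT (by name: the statement is the Claim_ definition above) =====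
theorem fill_unique_spec : Claim_equal_fill_unique := by
  intro list new_list _
  unfold Spec_fill_unique
  unfold fill_unique fill_unique_alt
  simp only []
  set pref := new_list.getD [] with hpref
  set seen0 := (list.filter (fun x => x != 0)).foldl PySem.Set.add (PySem.Set.ofList pref) with hseen0
  have h1 : ∀ r : Int, 1 ≤ r → (r ∈ seen0 ↔ r ∈ list ∨ r ∈ pref ++ ([] : List Int)) := by
    intro r hr
    have : seen0 = PySem.Set.update (PySem.Set.ofList pref) (list.filter (fun x => x != 0)) := rfl
    rw [this, PySem.Set.mem_update, PySem.Set.mem_ofList, List.mem_filter]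
    have hr0 : (r != (0 : Int)) = true := by simp; omega
    simp [hr0]
    tauto
  have hlen1 := pvFoldlAddLen (list.filter (fun x => x != 0)) (PySem.Set.ofList pref)
  have hlen2 := PySem.Set.length_ofList_le (xs := pref)
  have hlen3 := pvFilterCount list
  have hf : (seen0.length : Int) + list.count 0 < ((pref.length + list.length + 1 : Nat) : Int) := by
    rw [← hseen0] at hlen1
    push_cast
    omega
  have := pvMain list pref [] seen0 1 (pref.length + list.length + 1) le_rfl
    (fun k h1 h2 => absurd h1 (by omega)) h1 hf
  rwa [List.append_nil] at this
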